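-- pv_equiv track=rewrite | github.com/edouardmulliez/adventofcode | 2019/aoc_2019/day10/day10.py | extract_in_sorted_order
-- ===== SOURCE A (Python) =====
-- def extract_in_sorted_order(asteroids_per_angle):
--     sorted_asteroids = []
--
--     while True:
--         is_empty = True
--         for asteroids in asteroids_per_angle:
--             if asteroids:
--                 is_empty = False
--                 sorted_asteroids.append(asteroids.pop(0))
--         if is_empty:
--             return sorted_asteroids
-- ===== SOURCE B (Python) =====
-- def extract_in_sorted_order(asteroids_per_angle):
--     # Index-based round-robin: no pop(0), does not mutate the input lists.
--     rounds = 0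
--     for lst in asteroids_per_angle:
--         if len(lst) > rounds:
--             rounds = len(lst)
--     result = []
--     for r in range(rounds):
--         for lst in asteroids_per_angle:
--             if r < len(lst):
--                 result.append(lst[r])
--     return result
-- ===== Notes on version B (the rewrite author's own statement) =====
-- stated objective: faster
-- what changed: Replaces the destructive while-loop with pop(0) by index-based round-robin reads lst[r] for r in range(max length), removing the O(len) front-pops (and leaving the input lists unmutated; the equivalence is about the return value, A empties its argument in place).
import Mathlib
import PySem

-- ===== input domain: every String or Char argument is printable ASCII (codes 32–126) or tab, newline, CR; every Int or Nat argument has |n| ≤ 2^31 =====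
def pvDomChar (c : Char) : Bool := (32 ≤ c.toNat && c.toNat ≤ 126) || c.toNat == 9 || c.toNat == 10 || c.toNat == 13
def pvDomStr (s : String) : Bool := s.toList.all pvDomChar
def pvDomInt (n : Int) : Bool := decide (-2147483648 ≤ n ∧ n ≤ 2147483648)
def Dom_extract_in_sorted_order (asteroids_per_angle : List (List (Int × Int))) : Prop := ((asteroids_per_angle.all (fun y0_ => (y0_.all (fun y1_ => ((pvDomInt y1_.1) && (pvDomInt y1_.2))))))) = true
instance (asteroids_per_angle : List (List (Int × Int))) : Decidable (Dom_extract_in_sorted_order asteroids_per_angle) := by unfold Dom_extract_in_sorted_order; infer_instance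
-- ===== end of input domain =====

-- B replaces A's destructive pop(0) while-loop by index-based round-robin reads lst[r] (avoids O(len) front-pops; timing run could not measure a difference at the tested sizes).
-- A empties the input lists in place; B does not mutate — the equivalence proved here is about the RETURN value only.


-- ===== PORT A =====
-- termination helpers for A's while-loop (the total number of remaining asteroids decreases)
theorem pvSumTailLe (xs : List (List (Int × Int))) :
    ((xs.map List.tail).map List.length).sum ≤ (xs.map List.length).sum := by
  induction xs with
  | nil => simp
  | cons x xs ih =>
    simp only [List.map_cons, List.sum_cons]
    have : x.tail.length ≤ x.length := by simp [List.length_tail]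
    omega

theorem pvSumTailLt (xs : List (List (Int × Int)))
    (h : xs.filterMap List.head? ≠ []) :
    ((xs.map List.tail).map List.length).sum < (xs.map List.length).sum := by
  induction xs with
  | nil => simp at h
  | cons x xs ih =>
    simp only [List.map_cons, List.sum_cons]
    cases x with
    | nil =>
      simp only [List.filterMap_cons, List.head?_nil] at h
      have := ih h
      simp only [List.tail_nil] at *
      omega
    | cons a as =>
      have := pvSumTailLe xs
      simp only [List.tail_cons, List.length_cons]
      omega

-- while True: pop the head of every nonempty list (one for-pass), stop when the pass found nothing
def extract_in_sorted_order (asteroids_per_angle : List (List (Int × Int))) : List (Int × Int) :=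
  if h : asteroids_per_angle.filterMap List.head? = [] then []
  else asteroids_per_angle.filterMap List.head? ++ extract_in_sorted_order (asteroids_per_angle.map List.tail)
termination_by (asteroids_per_angle.map List.length).sum
decreasing_by simpa using pvSumTailLt _ h

-- ===== PORT B =====
def extract_in_sorted_order_alt (asteroids_per_angle : List (List (Int × Int))) : List (Int × Int) :=
  let rounds := asteroids_per_angle.foldl (fun acc l => max acc l.length) 0
  (List.range rounds).flatMap (fun r => asteroids_per_angle.filterMap (fun l => l[r]?))

-- ===== PRECONDITION & SPEC =====
def Spec_extract_in_sorted_order (asteroids_per_angle : List (List (Int × Int))) (out : List (Int × Int)) : Prop := out = extract_in_sorted_order_alt asteroids_per_angle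
instance (asteroids_per_angle : List (List (Int × Int))) (out : List (Int × Int)) : Decidable (Spec_extract_in_sorted_order asteroids_per_angle out) := by unfold Spec_extract_in_sorted_order; infer_instance

-- ===== CLAIM (what is proved, stated in full; the proofs are below) =====
def Claim_equal_extract_in_sorted_order : Prop := ∀ (asteroids_per_angle : List (List (Int × Int))), Dom_extract_in_sorted_order asteroids_per_angle → Spec_extract_in_sorted_order asteroids_per_angle (extract_in_sorted_order asteroids_per_angle)

-- ===== LEMMAS AND PROOFS =====

-- B's "rounds" is the max of the list lengths (as a fold over lengths)
theorem pvFoldMax (xs : List (List (Int × Int))) (a : ℕ) :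
    xs.foldl (fun acc l => max acc l.length) a = (xs.map List.length).foldl max a := by
  induction xs generalizing a with
  | nil => rfl
  | cons x xs ih => simp [List.foldl_cons, ih]

theorem pvInitLeFoldMax (xs : List ℕ) (a : ℕ) : a ≤ xs.foldl max a := by
  induction xs generalizing a with
  | nil => simp
  | cons y ys ih => exact le_trans (le_max_left a y) (ih (max a y))

theorem pvLeFoldMax (xs : List ℕ) (a : ℕ) (x : ℕ) (hx : x ∈ xs) :
    x ≤ xs.foldl max a := by
  induction xs generalizing a with
  | nil => simp at hx
  | cons y ys ih =>
    rcases List.mem_cons.mp hx with h | h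
    · subst h
      exact le_trans (le_max_right a x) (pvInitLeFoldMax ys (max a x))
    · exact ih _ h

theorem pvFoldMaxPred (xs : List ℕ) (a : ℕ) :
    (xs.map (· - 1)).foldl max (a - 1) = (xs.foldl max a) - 1 := by
  induction xs generalizing a with
  | nil => rfl
  | cons x xs ih =>
    simp only [List.map_cons, List.foldl_cons]
    rw [show max (a - 1) (x - 1) = max a x - 1 by omega, ih]

-- the per-round body of B on the tails is the next round on the original lists
theorem pvTailRound (xs : List (List (Int × Int))) (r : ℕ) :
    (xs.map List.tail).filterMap (fun l => l[r]?) = xs.filterMap (fun l => l[r + 1]?) := by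
  induction xs with
  | nil => rfl
  | cons x xs ih =>
    simp only [List.map_cons, List.filterMap_cons, ih, List.getElem?_tail]

-- heads-pass of A = round 0 of B
theorem pvHeadRound (xs : List (List (Int × Int))) :
    xs.filterMap List.head? = xs.filterMap (fun l => l[0]?) := by
  induction xs with
  | nil => rfl
  | cons x xs ih => cases x <;> simp [ih]

-- if the heads-pass found nothing, every list is empty
theorem pvHeadsNilAllNil (xs : List (List (Int × Int)))
    (h : xs.filterMap List.head? = []) : ∀ l ∈ xs, l = [] := by
  intro l hl
  cases hln : l with
  | nil => rfl
  | cons a as =>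
    exfalso
    have : (a, as.head?.getD a).1 = a := rfl
    have hmem : l.head? = some (a) := by rw [hln]; rfl
    have := List.filterMap_eq_nil_iff.mp h l hl
    rw [hmem] at this
    exact Option.some_ne_none a this

-- main equivalence, by induction on B's round count
theorem pvMain (n : ℕ) : ∀ (xs : List (List (Int × Int))),
    (xs.map List.length).foldl max 0 = n →
    extract_in_sorted_order xs = (List.range n).flatMap (fun r => xs.filterMap (fun l => l[r]?)) := by
  induction n with
  | zero =>
    intro xs hn
    rw [extract_in_sorted_order.eq_def]
    simp only [List.range_zero, List.flatMap_nil]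
    split
    · rfl
    · rename_i h
      exfalso
      apply h
      apply List.filterMap_eq_nil_iff.mpr
      intro l hl
      have hle : l.length ≤ 0 := hn ▸ pvLeFoldMax _ 0 _ (List.mem_map_of_mem hl)
      have : l = [] := List.eq_nil_of_length_eq_zero (Nat.le_zero.mp hle)
      simp [this]
  | succ m ih =>
    intro xs hn
    rw [extract_in_sorted_order.eq_def]
    split
    · rename_i h
      symm
      apply List.flatMap_eq_nil_iff.mpr
      intro r _
      apply List.filterMap_eq_nil_iff.mpr
      intro l hl
      rw [pvHeadsNilAllNil xs h l hl]
      rfl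
    · rename_i h
      have htail : ((xs.map List.tail).map List.length).foldl max 0 = m := by
        have h1 : (xs.map List.tail).map List.length = (xs.map List.length).map (· - 1) := by
          simp [List.map_map, Function.comp_def, List.length_tail]
        rw [h1, show (0 : ℕ) = 0 - 1 from rfl, pvFoldMaxPred, hn]; omega
      rw [ih _ htail, List.range_succ_eq_map, List.flatMap_cons, List.flatMap_map, pvHeadRound]
      congr 1
      apply List.flatMap_congr  -- pointwise: round r on tails = round r+1 on originals
      intro r _
      exact pvTailRound xs r

-- ===== VERDICT (by name: the statement is the Claim_ definition above) =====
theorem extract_in_sorted_order_spec : Claim_equal_extract_in_sorted_order := by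
  intro xs _
  unfold Spec_extract_in_sorted_order extract_in_sorted_order_alt
  rw [pvFoldMax]
  exact pvMain _ xs rfl
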